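-- pv_equiv track=rewrite | github.com/akashanup/programming | LongestStringChain/new-solution.py | isPredecessor
-- ===== SOURCE A (Python) =====
-- def isPredecessor(w1, w2):
--     if len(w2) != len(w1)+1:
--         return False
--     i, j = 0, 0
--     while j < len(w2):
--         if i < len(w1) and w1[i] == w2[j]:
--             i += 1
--             j += 1
--         else:
--             j += 1
--     return i == len(w1) and j == len(w2)
-- ===== SOURCE B (Python) =====
-- def isPredecessor(w1, w2):
--     if len(w2) != len(w1) + 1:
--         return False
--     idx = len(w1)
--     for i in range(len(w1)):
--         if w1[i] != w2[i]:
--             idx = i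
--             break
--     return w1[idx:] == w2[idx+1:]
-- ===== Notes on version B (the rewrite author's own statement) =====
-- stated objective: alternative
-- what changed: Replaces A's greedy two-pointer subsequence walk over w2 by locating the first index where w1 and w2 differ and comparing the remaining slices after skipping that one character of w2.
import Mathlib
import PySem

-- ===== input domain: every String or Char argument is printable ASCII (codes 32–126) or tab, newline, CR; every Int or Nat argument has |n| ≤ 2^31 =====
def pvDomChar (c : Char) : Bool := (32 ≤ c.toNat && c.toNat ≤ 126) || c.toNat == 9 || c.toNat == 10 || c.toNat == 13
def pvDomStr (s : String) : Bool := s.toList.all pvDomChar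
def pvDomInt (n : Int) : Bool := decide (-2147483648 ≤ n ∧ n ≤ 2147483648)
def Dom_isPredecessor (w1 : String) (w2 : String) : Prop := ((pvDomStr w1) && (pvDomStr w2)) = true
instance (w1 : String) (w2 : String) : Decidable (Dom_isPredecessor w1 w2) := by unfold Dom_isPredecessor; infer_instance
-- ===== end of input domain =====

-- B replaces A's greedy two-pointer subsequence walk by finding the first differing
-- index and comparing the tail slices (alternative decomposition, same cost).


-- ===== PORT A =====
-- the while loop of A: state (i, j), j advances every turn, i when the chars match;
-- indexing is always in range (guards i < len, j < len), ported with pyGetD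
def pvALoop (s1 s2 : List Char) (i j : Nat) : Bool :=
  if _h : j < s2.length then
    if i < s1.length && (PySem.List.pyGetD s1 (i : Int) ' ' == PySem.List.pyGetD s2 (j : Int) ' ') then
      pvALoop s1 s2 (i + 1) (j + 1)
    else
      pvALoop s1 s2 i (j + 1)
  else
    decide (i = s1.length) && decide (j = s2.length)
termination_by s2.length - j
decreasing_by all_goals omega

def isPredecessor (w1 : String) (w2 : String) : Bool :=
  if w2.toList.length ≠ w1.toList.length + 1 then false
  else pvALoop w1.toList w2.toList 0 0

-- ===== PORT B =====
-- B's for-loop with break: first index i < len(w1) with w1[i] != w2[i], else len(w1)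
def pvBIdx (s1 s2 : List Char) (i : Nat) : Nat :=
  if _h : i < s1.length then
    if PySem.List.pyGetD s1 (i : Int) ' ' != PySem.List.pyGetD s2 (i : Int) ' ' then i
    else pvBIdx s1 s2 (i + 1)
  else
    s1.length
termination_by s1.length - i
decreasing_by all_goals omega

def isPredecessor_alt (w1 : String) (w2 : String) : Bool :=
  if w2.toList.length ≠ w1.toList.length + 1 then false
  else
    let idx := pvBIdx w1.toList w2.toList 0
    PySem.List.slice w1.toList (some (idx : Int)) none ==
      PySem.List.slice w2.toList (some ((idx : Int) + 1)) none

-- ===== PRECONDITION & SPEC =====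
def Spec_isPredecessor (w1 : String) (w2 : String) (out : Bool) : Prop := out = isPredecessor_alt w1 w2
instance (w1 : String) (w2 : String) (out : Bool) : Decidable (Spec_isPredecessor w1 w2 out) := by unfold Spec_isPredecessor; infer_instance

-- ===== CLAIM (what is proved, stated in full; the proofs are below) =====
def Claim_equal_isPredecessor : Prop := ∀ (w1 : String) (w2 : String), Dom_isPredecessor w1 w2 → Spec_isPredecessor w1 w2 (isPredecessor w1 w2)

-- ===== LEMMAS AND PROOFS =====

-- suffix form of A's greedy walk
def pvG : List Char → List Char → Bool
  | xs, [] => xs.isEmpty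
  | [], _ :: ys => pvG [] ys
  | x :: xs, y :: ys => if x == y then pvG xs ys else pvG (x :: xs) ys

-- first-difference index, suffix form
def pvFd : List Char → List Char → Nat
  | x :: xs, y :: ys => if x == y then pvFd xs ys + 1 else 0
  | _, _ => 0

theorem pvALoop_eq_pvG (s1 s2 : List Char) :
    ∀ (n j i : Nat), s2.length - j = n → i ≤ s1.length → j ≤ s2.length →
      pvALoop s1 s2 i j = pvG (s1.drop i) (s2.drop j) := by
  intro n
  induction n with
  | zero =>
    intro j i hn hi hj
    have hj' : j = s2.length := by omega
    subst hj'
    rw [pvALoop]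
    simp only [lt_self_iff_false, dite_false, List.drop_length]
    by_cases h : i = s1.length
    · simp [h, List.drop_length, pvG]
    · have hlt : i < s1.length := by omega
      simp [pvG, h, List.drop_eq_nil_iff]
      omega
  | succ n ih =>
    intro j i hn hi hj
    have hjlt : j < s2.length := by omega
    have hd2 : s2.drop j = s2[j] :: s2.drop (j + 1) := List.drop_eq_getElem_cons hjlt
    have hget2 : PySem.List.pyGetD s2 (j : Int) ' ' = s2[j] := by
      simp [PySem.List.pyGetD_natCast, List.getD_eq_getElem?_getD, hjlt]
    rw [pvALoop, dif_pos hjlt]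
    by_cases hilt : i < s1.length
    · have hd1 : s1.drop i = s1[i] :: s1.drop (i + 1) := List.drop_eq_getElem_cons hilt
      have hget1 : PySem.List.pyGetD s1 (i : Int) ' ' = s1[i] := by
        simp [PySem.List.pyGetD_natCast, List.getD_eq_getElem?_getD, hilt]
      by_cases hc : s1[i] = s2[j]
      · rw [if_pos (by simp [hilt, hget1, hget2, hc])]
        rw [ih (j + 1) (i + 1) (by omega) (by omega) (by omega)]
        rw [hd1, hd2]
        simp [pvG, hc]
      · rw [if_neg (by simp [hget1, hget2, hc])]
        rw [ih (j + 1) i (by omega) hi (by omega)]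
        rw [hd1, hd2]
        simp [pvG, hc]
    · rw [if_neg (by simp [hilt])]
      rw [ih (j + 1) i (by omega) hi (by omega)]
      have hd1 : s1.drop i = [] := by
        rw [List.drop_eq_nil_iff]; omega
      rw [hd1, hd2]
      simp [pvG]
  
theorem pvBIdx_eq_pvFd (s1 s2 : List Char) (hlen : s1.length < s2.length) :
    ∀ (n i : Nat), s1.length - i = n → i ≤ s1.length →
      pvBIdx s1 s2 i = i + pvFd (s1.drop i) (s2.drop i) := by
  intro n
  induction n with
  | zero =>
    intro i hn hi
    have hi' : i = s1.length := by omega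
    subst hi'
    rw [pvBIdx]
    simp [List.drop_length, pvFd]
  | succ n ih =>
    intro i hn hi
    have hilt : i < s1.length := by omega
    have hilt2 : i < s2.length := by omega
    have hd1 : s1.drop i = s1[i] :: s1.drop (i + 1) := List.drop_eq_getElem_cons hilt
    have hd2 : s2.drop i = s2[i] :: s2.drop (i + 1) := List.drop_eq_getElem_cons hilt2
    have hget1 : PySem.List.pyGetD s1 (i : Int) ' ' = s1[i] := by
      simp [PySem.List.pyGetD_natCast, List.getD_eq_getElem?_getD, hilt]
    have hget2 : PySem.List.pyGetD s2 (i : Int) ' ' = s2[i] := by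
      simp [PySem.List.pyGetD_natCast, List.getD_eq_getElem?_getD, hilt2]
    rw [pvBIdx, dif_pos hilt, hget1, hget2]
    by_cases hc : s1[i] = s2[i]
    · rw [if_neg (by simp [hc])]
      rw [ih (i + 1) (by omega) (by omega)]
      rw [hd1, hd2]
      simp [pvFd, hc]
      omega
    · rw [if_pos (by simp [hc])]
      rw [hd1, hd2]
      simp [pvFd, hc]

theorem pvG_short : ∀ (xs ys : List Char), ys.length < xs.length → pvG xs ys = false := by
  intro xs ys
  induction ys generalizing xs with
  | nil =>
    intro h
    cases xs with
    | nil => simp at h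
    | cons x xs => simp [pvG]
  | cons y ys ih =>
    intro h
    cases xs with
    | nil => simp at h
    | cons x xs =>
      simp only [pvG]
      by_cases hc : x == y
      · rw [if_pos hc]
        exact ih xs (by simp at h ⊢; omega)
      · rw [if_neg hc]
        exact ih (x :: xs) (by simp at h ⊢; omega)

theorem pvG_eqLen : ∀ (xs ys : List Char), ys.length = xs.length → pvG xs ys = (xs == ys) := by
  intro xs
  induction xs with
  | nil =>
    intro ys h
    cases ys with
    | nil => simp [pvG]
    | cons y ys => simp at h
  | cons x xs ih =>
    intro ys h
    cases ys with
    | nil => simp at h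
    | cons y ys =>
      simp only [pvG, List.cons_beq_cons]
      by_cases hc : x == y
      · rw [if_pos hc, ih ys (by simp at h; omega), hc]
        simp
      · rw [if_neg hc]
        rw [pvG_short (x :: xs) ys (by simp at h ⊢; omega)]
        simp_all
  
theorem pvG_main : ∀ (xs ys : List Char), ys.length = xs.length + 1 →
    pvG xs ys = (xs.drop (pvFd xs ys) == ys.drop (pvFd xs ys + 1)) := by
  intro xs
  induction xs with
  | nil =>
    intro ys h
    match ys, h with
    | [y], _ => simp [pvG, pvFd]
  | cons x xs ih =>
    intro ys h
    cases ys with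
    | nil => simp at h
    | cons y ys =>
      have hlen : ys.length = xs.length + 1 := by simp at h; omega
      simp only [pvG, pvFd]
      by_cases hc : x == y
      · rw [if_pos hc, if_pos hc, ih ys hlen]
        simp
      · rw [if_neg hc, if_neg hc]
        rw [pvG_eqLen (x :: xs) ys (by simp; omega)]
        simp

-- ===== VERDICT (by name: the statement is the Claim_ definition above) =====
theorem isPredecessor_spec : Claim_equal_isPredecessor := by
  intro w1 w2 _
  unfold Spec_isPredecessor isPredecessor isPredecessor_alt
  by_cases hlen : w2.toList.length = w1.toList.length + 1
  · rw [if_neg (not_not_intro hlen), if_neg (not_not_intro hlen)]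
    rw [pvALoop_eq_pvG w1.toList w2.toList w2.toList.length 0 0 rfl (by omega) (by omega)]
    rw [pvBIdx_eq_pvFd w1.toList w2.toList (by omega) w1.toList.length 0 rfl (by omega)]
    simp only [List.drop_zero, Nat.zero_add]
    rw [pvG_main w1.toList w2.toList hlen]
    rw [PySem.List.slice_from_natCast]
    rw [show ((pvFd w1.toList w2.toList : Int) + 1) = (((pvFd w1.toList w2.toList + 1 : Nat)) : Int) by push_cast; ring]
    rw [PySem.List.slice_from_natCast]
  · rw [if_pos hlen, if_pos hlen]
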